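-- pv_equiv track=rewrite | github.com/blzzua/codewars | 7-kyu/last_digit_to_appear_in_sequence_of_powers.py | LDTA
-- ===== SOURCE A (Python) =====
-- def LDTA(n):
--     res = dict() # since dict is like sorted set
--     for cnt in range(1,25):
--         c = n**cnt
--         ints = [ int(d) for d in str(c) ]
--         for i in ints:
--             res[i] = None
--             if len(res) >= 10:
--                 return list(res.keys())[-1]
--     return None
-- ===== SOURCE B (Python) =====
-- def LDTA(n):
--     digits = [int(ch) for k in range(1, 25) for ch in str(n ** k)]
--     positions = [digits.index(d) for d in range(10) if d in digits]
--     if len(positions) < 10: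
--         return None
--     return digits[max(positions)]
-- ===== Notes on version B (the rewrite author's own statement) =====
-- stated objective: alternative
-- what changed: A dedupes the digit stream of n**1..n**24 in encounter order with an ordered dict and early-returns its last key when it holds 10 keys; B never dedupes: it computes, for each digit 0-9 present, the index of its FIRST occurrence in the full digit stream, and returns the stream element at the MAXIMUM of those first-occurrence indices (the last digit to appear), or None if fewer than 10 digits occur.
import Mathlib
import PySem

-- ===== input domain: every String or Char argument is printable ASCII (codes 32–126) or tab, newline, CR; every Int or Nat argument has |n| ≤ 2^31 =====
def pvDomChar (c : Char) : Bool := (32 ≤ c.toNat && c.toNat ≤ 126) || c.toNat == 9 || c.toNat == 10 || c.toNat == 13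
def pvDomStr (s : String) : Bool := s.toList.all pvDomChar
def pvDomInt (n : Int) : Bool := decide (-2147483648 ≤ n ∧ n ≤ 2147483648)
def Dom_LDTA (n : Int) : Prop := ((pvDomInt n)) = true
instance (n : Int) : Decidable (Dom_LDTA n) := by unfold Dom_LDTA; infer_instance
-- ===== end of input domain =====

-- B replaces A's early-exit ordered-dict dedup scan by ten independent first-occurrence
-- index searches and an argmax over them ("alternative"; not faster).

-- ===== PORT A =====
-- [int(d) for d in str(c)]; the .getD 0 is unreachable under Pre_ (for c ≥ 0 every char of
-- str(c) is a digit; for c < 0 Python's int('-') raises ValueError, excluded by Pre_)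
def pvStrDigits (c : Int) : List Int :=
  (PySem.Int.toStr c).toList.map (fun d => (PySem.Int.ofChars? [d]).getD 0)

-- inner 'for i in ints' loop of A: .inr v = early 'return list(res.keys())[-1]', .inl res = loop finished
def pvInnerA (res : PySem.Dict Int (Option Int)) : List Int → Sum (PySem.Dict Int (Option Int)) (Option Int)
  | [] => .inl res
  | i :: rest =>
    let res' := res.insert i none
    if 10 ≤ res'.size then .inr (PySem.List.pyGet? res'.keys (-1))
    else pvInnerA res' rest

-- outer 'for cnt in range(1,25)' loop of A
def pvOuterA (n : Int) (res : PySem.Dict Int (Option Int)) : List Int → Option Int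
  | [] => none
  | cnt :: rest =>
    match pvInnerA res (pvStrDigits (n ^ cnt.toNat)) with
    | .inr v => v
    | .inl res' => pvOuterA n res' rest

def LDTA (n : Int) : Option Int :=
  pvOuterA n PySem.Dict.empty (PySem.List.pyRange 1 25 1)

-- ===== PORT B =====
-- digits = [int(ch) for k in range(1,25) for ch in str(n**k)]
-- positions = [digits.index(d) for d in range(10) if d in digits]  (index always succeeds under the filter)
-- return digits[max(positions)] if len(positions) >= 10 else None
def LDTA_alt (n : Int) : Option Int :=
  let digits := (PySem.List.pyRange 1 25 1).flatMap (fun k => pvStrDigits (n ^ k.toNat))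
  let positions := ((PySem.List.pyRange 0 10 1).filter (fun d => digits.contains d)).map
      (fun d => (((PySem.List.index? digits d).getD 0 : Nat) : Int))
  if positions.length < 10 then none
  else match PySem.List.max? positions (fun x => x) with
       | some m => PySem.List.pyGet? digits m
       | none => none

-- ===== PRECONDITION & SPEC =====
-- Pre_ excludes n < 0, where Python's int('-') raises ValueError (in both A and B).
def Pre_LDTA (n : Int) : Prop := 0 ≤ n
instance (n : Int) : Decidable (Pre_LDTA n) := by unfold Pre_LDTA; infer_instance
def pvWitness_LDTA : Int := (2)

def Spec_LDTA (n : Int) (out : Option Int) : Prop := out = LDTA_alt n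
instance (n : Int) (out : Option Int) : Decidable (Spec_LDTA n out) := by unfold Spec_LDTA; infer_instance

-- ===== CLAIM (what is proved, stated in full; the proofs are below) =====
def Claim_equal_LDTA : Prop := ∀ (n : Int), Dom_LDTA n → Pre_LDTA n → Spec_LDTA n (LDTA n)

-- ===== LEMMAS AND PROOFS =====

-- ---------- A's loops compute: dedup the digit stream, take element 9 ----------

-- A's 'res' dict always maps the distinct digits seen so far (in first-appearance order) to None:
def mkD (acc : List Int) : PySem.Dict Int (Option Int) :=
  PySem.Dict.mk (acc.map (fun k => (k, (none : Option Int))))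

theorem keys_mkD (acc : List Int) : (mkD acc).keys = acc := by
  simp [mkD, PySem.Dict.keys, Function.comp_def]

theorem size_mkD (acc : List Int) : (mkD acc).size = acc.length := by
  simp [mkD, PySem.Dict.size]

theorem contains_mkD (acc : List Int) (i : Int) :
    (mkD acc).contains i = true ↔ i ∈ acc := by
  simp only [mkD, PySem.Dict.contains_mk, List.any_map, Function.comp_def, List.any_eq_true,
    beq_iff_eq]
  constructor
  · rintro ⟨a, ha, rfl⟩; exact ha
  · intro hi; exact ⟨i, hi, rfl⟩

-- 'res[i] = None' is exactly an order-preserving set-add on the key list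
theorem insert_mkD (acc : List Int) (i : Int) :
    (mkD acc).insert i none = mkD (PySem.Set.add acc i) := by
  apply PySem.Dict.ext
  by_cases h : i ∈ acc
  · rw [PySem.Dict.items_insert_of_contains _ _ ((contains_mkD acc i).mpr h)]
    simp only [mkD, PySem.Set.add, PySem.Set.contains, List.contains_eq_mem, h, decide_true, if_true]
    simp only [List.map_map, Function.comp_def]
    apply List.map_congr_left
    intro a _
    by_cases hai : a = i <;> simp [hai]
  · rw [PySem.Dict.items_insert_of_not_contains _ _ (by
      rw [Bool.eq_false_iff]; exact fun hc => h ((contains_mkD acc i).mp hc))]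
    simp [mkD, PySem.Set.add, PySem.Set.contains, h]

theorem add_cases (acc : List Int) (i : Int) :
    (PySem.Set.add acc i = acc ∧ i ∈ acc) ∨ (PySem.Set.add acc i = acc ++ [i] ∧ i ∉ acc) := by
  by_cases hi : i ∈ acc
  · exact .inl ⟨by simp [PySem.Set.add, PySem.Set.contains, hi], hi⟩
  · exact .inr ⟨by simp [PySem.Set.add, PySem.Set.contains, hi], hi⟩

-- an order-preserving dedup fold only ever appends to its accumulator
theorem foldl_add_prefix (l : List Int) : ∀ acc, ∃ t, List.foldl PySem.Set.add acc l = acc ++ t := by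
  induction l with
  | nil => intro acc; exact ⟨[], by simp⟩
  | cons x l ih =>
    intro acc
    obtain ⟨t, ht⟩ := ih (PySem.Set.add acc x)
    rcases add_cases acc x with ⟨hadd, _⟩ | ⟨hadd, _⟩ <;> rw [hadd] at ht
    · exact ⟨t, by rw [List.foldl_cons, hadd, ht]⟩
    · exact ⟨x :: t, by rw [List.foldl_cons, hadd, ht]; simp⟩

-- A's inner early-exit scan, started below 10 keys: dedup the digit list into s; if s has
-- ≥ 10 elements the early return yields s[9], else the loop ends with the dict holding s.
theorem inner_spec (ds : List Int) : ∀ acc, acc.length < 10 →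
    pvInnerA (mkD acc) ds =
      (let s := List.foldl PySem.Set.add acc ds;
       if 10 ≤ s.length then Sum.inr (PySem.List.pyGet? s 9) else Sum.inl (mkD s)) := by
  induction ds with
  | nil =>
    intro acc h
    simp only [pvInnerA, List.foldl_nil]
    rw [if_neg (by omega)]
  | cons i rest ih =>
    intro acc h
    simp only [pvInnerA, List.foldl_cons, insert_mkD, size_mkD, keys_mkD]
    by_cases h10 : 10 ≤ (PySem.Set.add acc i).length
    · rw [if_pos h10]
      rcases add_cases acc i with ⟨hadd, _⟩ | ⟨hadd, _⟩
      · rw [hadd] at h10; omega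
      · have hlen : acc.length = 9 := by
          have := congrArg List.length hadd; simp at this; omega
        obtain ⟨t, ht⟩ := foldl_add_prefix rest (PySem.Set.add acc i)
        rw [ht, hadd]
        rw [if_pos (by simp; omega)]
        congr 1
        rw [PySem.List.pyGet?_neg_one_append_singleton]
        rw [show (9:Int) = ((9:Nat):Int) from rfl, PySem.List.pyGet?_natCast ((acc ++ [i]) ++ t) 9]
        rw [List.getElem?_append_left (by simp; omega)]
        rw [← hlen, List.getElem?_concat_length]
    · rw [if_neg h10]
      rcases add_cases acc i with ⟨hadd, _⟩ | ⟨hadd, _⟩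
      · exact ih _ (by rw [hadd]; exact h)
      · refine ih _ ?_
        rw [hadd] at h10 ⊢
        simp at h10 ⊢
        omega

-- A's outer loop over the powers = one dedup fold over the concatenated digit stream, then index 9
theorem outer_spec (n : Int) (ks : List Int) : ∀ acc, acc.length < 10 →
    pvOuterA n (mkD acc) ks =
      (let s := List.foldl PySem.Set.add acc (ks.flatMap (fun k => pvStrDigits (n ^ k.toNat)));
       if 10 ≤ s.length then PySem.List.pyGet? s 9 else none) := by
  induction ks with
  | nil =>
    intro acc h
    simp only [pvOuterA, List.flatMap_nil, List.foldl_nil]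
    rw [if_neg (by omega)]
  | cons k rest ih =>
    intro acc h
    simp only [pvOuterA, List.flatMap_cons, List.foldl_append]
    rw [inner_spec _ acc h]
    by_cases h10 : 10 ≤ (List.foldl PySem.Set.add acc (pvStrDigits (n ^ k.toNat))).length
    · rw [if_pos h10]
      obtain ⟨t, ht⟩ := foldl_add_prefix (rest.flatMap (fun k => pvStrDigits (n ^ k.toNat)))
        (List.foldl PySem.Set.add acc (pvStrDigits (n ^ k.toNat)))
      simp only [ht]
      rw [if_pos (by simp; omega)]
      rw [show (9:Int) = ((9:Nat):Int) from rfl, PySem.List.pyGet?_natCast,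
        PySem.List.pyGet?_natCast]
      rw [List.getElem?_append_left (by omega)]
    · rw [if_neg h10]
      exact ih _ (by omega)

-- ---------- the digit stream consists of digits 0..9 ----------

theorem digitChar_isDigit (k : Nat) (hk : k < 10) : (Nat.digitChar k).isDigit = true := by
  interval_cases k <;> decide

theorem toDigitsCore_isDigit (f : Nat) : ∀ (m : Nat) (l : List Char),
    (∀ c ∈ l, c.isDigit = true) → ∀ c ∈ Nat.toDigitsCore 10 f m l, c.isDigit = true := by
  induction f with
  | zero => intro m l hl; simpa [Nat.toDigitsCore] using hl
  | succ f ih =>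
    intro m l hl c hc
    have hstep : Nat.toDigitsCore 10 (f + 1) m l =
        if m / 10 = 0 then Nat.digitChar (m % 10) :: l
        else Nat.toDigitsCore 10 f (m / 10) (Nat.digitChar (m % 10) :: l) := rfl
    have hcons : ∀ c' ∈ Nat.digitChar (m % 10) :: l, c'.isDigit = true := by
      intro c' hc'
      rcases List.mem_cons.mp hc' with h1 | h1
      · exact h1 ▸ digitChar_isDigit _ (Nat.mod_lt _ (by omega))
      · exact hl c' h1
    rw [hstep] at hc
    by_cases hd : m / 10 = 0
    · rw [if_pos hd] at hc
      exact hcons c hc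
    · rw [if_neg hd] at hc
      exact ih (m / 10) _ hcons c hc

theorem toChars_isDigit (c : Int) (hc : 0 ≤ c) :
    ∀ ch ∈ PySem.Int.toChars c, ch.isDigit = true := by
  intro ch hch
  rw [PySem.Int.toChars, if_neg (by omega)] at hch
  exact toDigitsCore_isDigit _ _ _ (by simp) ch hch

theorem isDigit_mem (c : Char) (h : c.isDigit = true) :
    c ∈ ['0','1','2','3','4','5','6','7','8','9'] := by
  have hc : Char.ofNat c.toNat = c := Char.ofNat_toNat c
  set k := c.toNat with hk
  have h1 : 48 ≤ k := by
    simp only [Char.isDigit, Bool.and_eq_true, decide_eq_true_eq] at h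
    exact h.1
  have h2 : k ≤ 57 := by
    simp only [Char.isDigit, Bool.and_eq_true, decide_eq_true_eq] at h
    exact h.2
  clear_value k
  interval_cases k <;> rw [← hc] <;> decide

theorem pvStrDigits_range (c : Int) (hc : 0 ≤ c) :
    ∀ d ∈ pvStrDigits c, 0 ≤ d ∧ d < 10 := by
  intro d hd
  simp only [pvStrDigits, PySem.Int.toList_toStr, List.mem_map] at hd
  obtain ⟨ch, hch, rfl⟩ := hd
  have := isDigit_mem ch (toChars_isDigit c hc ch hch)
  fin_cases this <;> decide

-- ---------- dedup preserves first-occurrence order ----------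

theorem dedup_append_singleton (l : List Int) (x : Int) :
    PySem.List.dedup (l ++ [x]) =
      if x ∈ l then PySem.List.dedup l else PySem.List.dedup l ++ [x] := by
  rw [PySem.List.dedup_eq_ofList, PySem.List.dedup_eq_ofList, PySem.Set.ofList_eq_foldl,
    PySem.Set.ofList_eq_foldl, List.foldl_append, List.foldl_cons, List.foldl_nil]
  rcases add_cases (List.foldl PySem.Set.add [] l) x with ⟨hadd, hmem⟩ | ⟨hadd, hmem⟩
  · rw [hadd, if_pos]
    rw [← PySem.Set.ofList_eq_foldl, ← PySem.List.dedup_eq_ofList] at hmem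
    exact (PySem.List.mem_dedup _ _).mp hmem
  · rw [hadd, if_neg]
    intro hx
    exact hmem (by
      rw [← PySem.Set.ofList_eq_foldl, ← PySem.List.dedup_eq_ofList]
      exact (PySem.List.mem_dedup _ _).mpr hx)

-- elements of dedup l, in order, have strictly increasing first-occurrence indices in l
theorem dedup_pairwise_index (l : List Int) :
    (PySem.List.dedup l).Pairwise
      (fun a b => ∃ i j, PySem.List.index? l a = some i ∧ PySem.List.index? l b = some j ∧ i < j) := by
  induction l using List.reverseRecOn with
  | nil => simp [PySem.List.dedup]
  | append_singleton l x ih =>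
    rw [dedup_append_singleton]
    by_cases hx : x ∈ l
    · rw [if_pos hx]
      refine ih.imp_of_mem ?_
      rintro a b ha hb ⟨i, j, hia, hjb, hij⟩
      have ha' : a ∈ l := (PySem.List.mem_dedup _ _).mp ha
      have hb' : b ∈ l := (PySem.List.mem_dedup _ _).mp hb
      exact ⟨i, j, by rw [PySem.List.index?_append_of_mem _ ha']; exact hia,
             by rw [PySem.List.index?_append_of_mem _ hb']; exact hjb, hij⟩
    · rw [if_neg hx]
      rw [List.pairwise_append]
      refine ⟨ih.imp_of_mem ?_, by simp, ?_⟩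
      · rintro a b ha hb ⟨i, j, hia, hjb, hij⟩
        have ha' : a ∈ l := (PySem.List.mem_dedup _ _).mp ha
        have hb' : b ∈ l := (PySem.List.mem_dedup _ _).mp hb
        exact ⟨i, j, by rw [PySem.List.index?_append_of_mem _ ha']; exact hia,
               by rw [PySem.List.index?_append_of_mem _ hb']; exact hjb, hij⟩
      · intro a ha b hb
        have hb' : b = x := by simpa using hb
        subst hb'
        have ha' : a ∈ l := (PySem.List.mem_dedup _ _).mp ha
        obtain ⟨i, hi⟩ := Option.isSome_iff_exists.mp ((PySem.List.index?_isSome_iff l a).mpr ha')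
        obtain ⟨hlt, -, -⟩ := PySem.List.getElem_of_index?_eq_some hi
        exact ⟨i, l.length, by rw [PySem.List.index?_append_of_mem _ ha']; exact hi,
               PySem.List.index?_append_singleton_self l _ hx, hlt⟩

-- ---------- core equivalence on the shared digit stream ----------

-- Both ports read the same stream 'digits'; given that its elements are digits 0..9, A's
-- "dedup, take element 9" equals B's "argmax of first-occurrence indices".
theorem core_equiv (l : List Int) (hl : ∀ d ∈ l, 0 ≤ d ∧ d < 10) :
    (if 10 ≤ (PySem.List.dedup l).length then PySem.List.pyGet? (PySem.List.dedup l) 9 else none) =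
    (if (((PySem.List.pyRange 0 10 1).filter (fun d => l.contains d)).map
          (fun d => (((PySem.List.index? l d).getD 0 : Nat) : Int))).length < 10 then none
     else match PySem.List.max? (((PySem.List.pyRange 0 10 1).filter (fun d => l.contains d)).map
          (fun d => (((PySem.List.index? l d).getD 0 : Nat) : Int))) (fun x => x) with
          | some m => PySem.List.pyGet? l m
          | none => none) := by
  have hnds : (PySem.List.dedup l).Nodup := PySem.List.nodup_dedup l
  have hndf : ((PySem.List.pyRange 0 10 1).filter (fun d => l.contains d)).Nodup :=
    (PySem.List.nodup_pyRange_one 0 10).filter _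
  have hmemf : ∀ a, a ∈ (PySem.List.pyRange 0 10 1).filter (fun d => l.contains d) ↔ a ∈ l := by
    intro a
    simp only [List.mem_filter, PySem.List.mem_pyRange_one, List.contains_eq_mem,
      decide_eq_true_eq]
    exact ⟨fun h => h.2, fun h => ⟨hl a h, h⟩⟩
  have hperm : (PySem.List.dedup l).Perm
      ((PySem.List.pyRange 0 10 1).filter (fun d => l.contains d)) :=
    (List.perm_ext_iff_of_nodup hnds hndf).mpr
      (fun a => by rw [PySem.List.mem_dedup, hmemf])
  have hlen : (PySem.List.dedup l).length =
      ((PySem.List.pyRange 0 10 1).filter (fun d => l.contains d)).length := hperm.length_eq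
  have hrlen : (PySem.List.pyRange 0 10 1).length = 10 := rfl
  by_cases h10 : 10 ≤ (PySem.List.dedup l).length
  · rw [if_pos h10, if_neg (by rw [List.length_map]; omega)]
    have hle : ((PySem.List.pyRange 0 10 1).filter (fun d => l.contains d)).length ≤ 10 := by
      have := (List.filter_sublist (l := PySem.List.pyRange 0 10 1)
        (p := fun d => l.contains d)).length_le
      omega
    have hfl_eq : (PySem.List.pyRange 0 10 1).filter (fun d => l.contains d) =
        PySem.List.pyRange 0 10 1 :=
      List.filter_sublist.eq_of_length (by omega)
    rw [hfl_eq]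
    have h9 : 9 < (PySem.List.dedup l).length := by omega
    have heL : (PySem.List.dedup l)[9] ∈ l :=
      (PySem.List.mem_dedup _ _).mp (List.getElem_mem h9)
    obtain ⟨ke, hke⟩ := Option.isSome_iff_exists.mp
      ((PySem.List.index?_isSome_iff l _).mpr heL)
    obtain ⟨hkelt, hkeval, -⟩ := PySem.List.getElem_of_index?_eq_some hke
    have heRange : (PySem.List.dedup l)[9] ∈ PySem.List.pyRange 0 10 1 :=
      (PySem.List.mem_pyRange_one).mpr (hl _ heL)
    have hpos_mem : ((ke : Nat) : Int) ∈ (PySem.List.pyRange 0 10 1).map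
        (fun d => (((PySem.List.index? l d).getD 0 : Nat) : Int)) := by
      refine List.mem_map.mpr ⟨_, heRange, ?_⟩
      rw [hke]
      rfl
    cases hmax : PySem.List.max? ((PySem.List.pyRange 0 10 1).map
        (fun d => (((PySem.List.index? l d).getD 0 : Nat) : Int))) (fun x => x) with
    | none =>
      exfalso
      rw [PySem.List.max?_eq_none_iff] at hmax
      rw [hmax] at hpos_mem
      exact (List.not_mem_nil) hpos_mem
    | some m =>
      have hmle : ((ke : Nat) : Int) ≤ m := PySem.List.max?_isMax hmax _ hpos_mem
      obtain ⟨d0, hd0r, hd0e⟩ := List.mem_map.mp (PySem.List.max?_mem hmax)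
      have hd0l : d0 ∈ l := (hmemf d0).mp (by rw [hfl_eq]; exact hd0r)
      obtain ⟨k0, hk0⟩ := Option.isSome_iff_exists.mp
        ((PySem.List.index?_isSome_iff l d0).mpr hd0l)
      have hm0 : m = ((k0 : Nat) : Int) := by rw [← hd0e, hk0]; rfl
      obtain ⟨j, hj, hdj⟩ := List.mem_iff_getElem.mp ((PySem.List.mem_dedup _ _).mpr hd0l)
      have hk0le : k0 ≤ ke := by
        rcases Nat.lt_or_ge j 9 with hj9 | hj9
        · obtain ⟨i', j', hi', hj', hij⟩ :=
            (List.pairwise_iff_getElem.mp (dedup_pairwise_index l)) j 9 hj h9 hj9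
          rw [hdj, hk0] at hi'
          rw [hke] at hj'
          have h1 : i' = k0 := (Option.some.injEq _ _ ▸ hi').symm
          have h2 : j' = ke := (Option.some.injEq _ _ ▸ hj').symm
          omega
        · have hj9' : j = 9 := by omega
          subst hj9'
          rw [hdj] at hke
          have := Option.some.inj (hke.symm.trans hk0)
          omega
      have hmke : m = ((ke : Nat) : Int) := by
        rw [hm0] at hmle ⊢
        have : k0 = ke := by omega
        rw [this]
      rw [hmke]
      show PySem.List.pyGet? (PySem.List.dedup l) 9 = PySem.List.pyGet? l ((ke : Nat) : Int)
      rw [show (9:Int) = ((9:Nat):Int) from rfl, PySem.List.pyGet?_natCast,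
        PySem.List.pyGet?_natCast, List.getElem?_eq_getElem h9, List.getElem?_eq_getElem hkelt,
        hkeval]
  · rw [if_neg h10, if_pos (by rw [List.length_map]; omega)]

-- ===== VERDICT (by name: the statement is the Claim_ definition above) =====
theorem LDTA_spec : Claim_equal_LDTA := by
  intro n _ hn
  unfold Spec_LDTA
  have hempty : (PySem.Dict.empty : PySem.Dict Int (Option Int)) = mkD [] := rfl
  rw [LDTA, hempty, outer_spec n _ [] (by simp)]
  have hrange : ∀ d ∈ (PySem.List.pyRange 1 25 1).flatMap (fun k => pvStrDigits (n ^ k.toNat)),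
      0 ≤ d ∧ d < 10 := by
    intro d hd
    rw [List.mem_flatMap] at hd
    obtain ⟨k, -, hdk⟩ := hd
    exact pvStrDigits_range _ (pow_nonneg hn _) d hdk
  show (if 10 ≤ (List.foldl PySem.Set.add []
          ((PySem.List.pyRange 1 25 1).flatMap (fun k => pvStrDigits (n ^ k.toNat)))).length
        then PySem.List.pyGet? (List.foldl PySem.Set.add []
          ((PySem.List.pyRange 1 25 1).flatMap (fun k => pvStrDigits (n ^ k.toNat)))) 9
        else none) = LDTA_alt n
  rw [← PySem.Set.ofList_eq_foldl, ← PySem.List.dedup_eq_ofList]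
  exact core_equiv _ hrange
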